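-- pv_equiv track=rewrite | github.com/jcolinpatrick/kryptos | scripts/grille/e_fleissner_8x9_180.py | check_periodic_consistency
-- ===== SOURCE A (Python) =====
-- def check_periodic_consistency(key_at_rank, period):
--     """Check if key values are consistent with a periodic key.
--     Returns (n_consistent, n_total) where n_consistent = number of residue
--     classes with no conflicts.
--     """
--     residues = {}  # residue → set of key values
--     for rank, k in key_at_rank.items():
--         r = rank % period
--         if r not in residues:
--             residues[r] = set()
--         residues[r].add(k)
--
--     n_consistent = sum(1 for vals in residues.values() if len(vals) == 1)
--     n_total = len(residues)
--     n_conflicts = sum(1 for vals in residues.values() if len(vals) > 1)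
--     return n_consistent, n_total, n_conflicts
-- ===== SOURCE B (Python) =====
-- def check_periodic_consistency(key_at_rank, period):
--     """One pass: first-seen representative per residue class + set of
--     conflicting residues, instead of a full value-set per class."""
--     rep = {}
--     conflicts = set()
--     for rank, k in key_at_rank.items():
--         r = rank % period
--         if r not in rep:
--             rep[r] = k
--         elif rep[r] != k:
--             conflicts.add(r)
--     n_total = len(rep)
--     n_conflicts = len(conflicts)
--     return n_total - n_conflicts, n_total, n_conflicts
-- ===== Notes on version B (the rewrite author's own statement) =====
-- stated objective: simpler
-- what changed: Instead of grouping all key values into a set per residue class and then counting set sizes in three extra passes, B does a single pass keeping only a first-seen representative per residue and a set of residues observed to conflict, and derives all three counts from their sizes.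
import Mathlib
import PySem

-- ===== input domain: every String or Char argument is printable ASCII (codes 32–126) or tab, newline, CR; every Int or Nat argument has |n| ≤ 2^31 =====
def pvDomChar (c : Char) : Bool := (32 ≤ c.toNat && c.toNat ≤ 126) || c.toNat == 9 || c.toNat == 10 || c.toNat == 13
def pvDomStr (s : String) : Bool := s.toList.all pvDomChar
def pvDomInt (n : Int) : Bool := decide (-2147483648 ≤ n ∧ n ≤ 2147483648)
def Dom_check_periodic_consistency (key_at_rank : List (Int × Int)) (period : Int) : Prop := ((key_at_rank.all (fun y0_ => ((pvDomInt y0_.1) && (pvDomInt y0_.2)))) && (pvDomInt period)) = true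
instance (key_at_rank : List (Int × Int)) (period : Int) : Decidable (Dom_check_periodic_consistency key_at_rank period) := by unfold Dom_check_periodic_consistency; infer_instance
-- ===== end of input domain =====

-- B replaces A's per-residue value-sets (plus three counting passes over them) by a single pass
-- keeping a first-seen representative per residue and a set of conflicting residues (simpler).


-- ===== PORT A =====
-- loop body of A: r = rank % period; if r not in residues: residues[r] = set(); residues[r].add(k)
def pvAStep (period : Int) (d : PySem.Dict Int (PySem.Set Int)) (p : Int × Int) :
    PySem.Dict Int (PySem.Set Int) :=
  let r := PySem.Int.mod p.1 period
  let d1 := if d.contains r then d else d.insert r PySem.Set.empty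
  d1.insert r (PySem.Set.add (d1.getD r PySem.Set.empty) p.2)

def check_periodic_consistency (key_at_rank : List (Int × Int)) (period : Int) : Int × Int × Int :=
  let residues := key_at_rank.foldl (pvAStep period) PySem.Dict.empty
  let n_consistent : Int := ((residues.values.filter (fun vals => vals.length == 1)).length : Int)
  let n_total : Int := (residues.size : Int)
  let n_conflicts : Int := ((residues.values.filter (fun vals => 1 < vals.length)).length : Int)
  (n_consistent, n_total, n_conflicts)

-- ===== PORT B =====
-- loop body of B: r = rank % period; if r not in rep: rep[r] = k; elif rep[r] != k: conflicts.add(r)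
def pvBStep (period : Int) (st : PySem.Dict Int Int × PySem.Set Int) (p : Int × Int) :
    PySem.Dict Int Int × PySem.Set Int :=
  let r := PySem.Int.mod p.1 period
  match st.1.get? r with
  | none => (st.1.insert r p.2, st.2)
  | some v => (st.1, if v == p.2 then st.2 else PySem.Set.add st.2 r)

def check_periodic_consistency_alt (key_at_rank : List (Int × Int)) (period : Int) : Int × Int × Int :=
  let st := key_at_rank.foldl (pvBStep period) (PySem.Dict.empty, PySem.Set.empty)
  let n_total : Int := (st.1.size : Int)
  let n_conflicts : Int := (st.2.length : Int)
  (n_total - n_conflicts, n_total, n_conflicts)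

-- ===== PRECONDITION & SPEC =====
-- Pre_ excludes only the inputs where Python raises ZeroDivisionError: period = 0 with a non-empty dict
def Pre_check_periodic_consistency (key_at_rank : List (Int × Int)) (period : Int) : Prop :=
  key_at_rank = [] ∨ period ≠ 0
instance (key_at_rank : List (Int × Int)) (period : Int) : Decidable (Pre_check_periodic_consistency key_at_rank period) := by unfold Pre_check_periodic_consistency; infer_instance
def pvWitness_check_periodic_consistency : (List (Int × Int)) × Int := ([(0, 1), (1, 2), (2, 1), (3, 5)], 2)

def Spec_check_periodic_consistency (key_at_rank : List (Int × Int)) (period : Int) (out : Int × Int × Int) : Prop := out = check_periodic_consistency_alt key_at_rank period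
instance (key_at_rank : List (Int × Int)) (period : Int) (out : Int × Int × Int) : Decidable (Spec_check_periodic_consistency key_at_rank period out) := by unfold Spec_check_periodic_consistency; infer_instance

-- ===== CLAIM (what is proved, stated in full; the proofs are below) =====
def Claim_equal_check_periodic_consistency : Prop := ∀ (key_at_rank : List (Int × Int)) (period : Int), Dom_check_periodic_consistency key_at_rank period → Pre_check_periodic_consistency key_at_rank period → Spec_check_periodic_consistency key_at_rank period (check_periodic_consistency key_at_rank period)

-- ===== LEMMAS AND PROOFS =====

-- relation between A's residue→set dict and B's (representative dict, conflict set) state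
def pvInv (d : PySem.Dict Int (PySem.Set Int)) (rep : PySem.Dict Int Int) (conf : PySem.Set Int) : Prop :=
  d.keys = rep.keys ∧ d.keys.Nodup ∧ conf.Nodup ∧ (∀ r, r ∈ conf → r ∈ d.keys) ∧
  ∀ r, r ∈ d.keys → ∃ v s, rep.get? r = some v ∧ d.getD r PySem.Set.empty = v :: s ∧ (r ∈ conf ↔ s ≠ [])

theorem pvAStep_eq (period : Int) (d : PySem.Dict Int (PySem.Set Int)) (p : Int × Int) :
    pvAStep period d p =
      d.insert (PySem.Int.mod p.1 period)
        (PySem.Set.add (d.getD (PySem.Int.mod p.1 period) PySem.Set.empty) p.2) := by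
  unfold pvAStep
  by_cases h : d.contains (PySem.Int.mod p.1 period)
  · simp [h]
  · simp only [Bool.not_eq_true] at h
    simp only [h, Bool.false_eq_true, if_false, PySem.Dict.getD_insert_self,
      PySem.Dict.insert_insert_self]
    rw [PySem.Dict.getD_of_not_contains d PySem.Set.empty h]

theorem pvInv_step (period : Int) (d : PySem.Dict Int (PySem.Set Int))
    (rep : PySem.Dict Int Int) (conf : PySem.Set Int) (p : Int × Int)
    (h : pvInv d rep conf) :
    pvInv (pvAStep period d p) (pvBStep period (rep, conf) p).1 (pvBStep period (rep, conf) p).2 := by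
  obtain ⟨hk, hnd, hcn, hcs, hprop⟩ := h
  rw [pvAStep_eq]
  set r := PySem.Int.mod p.1 period with hr
  cases hg : rep.get? r with
  | none =>
    -- r is a fresh residue: both sides append it
    have hB : pvBStep period (rep, conf) p = (rep.insert r p.2, conf) := by
      simp [pvBStep, ← hr, hg]
    rw [hB]
    have hrk : r ∉ rep.keys := (PySem.Dict.get?_eq_none_iff_not_mem_keys rep r).mp hg
    have hdk : r ∉ d.keys := hk ▸ hrk
    have hdc : d.contains r = false := by
      rw [PySem.Dict.contains_eq_decide_mem_keys]; simp [hdk]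
    have hrc : rep.contains r = false := by
      rw [PySem.Dict.contains_eq_decide_mem_keys]; simp [hrk]
    refine ⟨?_, ?_, hcn, ?_, ?_⟩
    · rw [PySem.Dict.keys_insert_of_not_contains d _ hdc,
        PySem.Dict.keys_insert_of_not_contains rep _ hrc, hk]
    · rw [PySem.Dict.keys_insert_of_not_contains d _ hdc]
      simpa using List.Nodup.append hnd (List.nodup_singleton r) (by simp [hdk])
    · intro x hx
      rw [PySem.Dict.keys_insert_of_not_contains d _ hdc]
      exact List.mem_append_left _ (hcs x hx)
    · intro x hx
      rw [PySem.Dict.keys_insert_of_not_contains d _ hdc] at hx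
      rcases List.mem_append.mp hx with hx | hx
      · have hne : x ≠ r := fun e => hdk (e ▸ hx)
        obtain ⟨v, s, h1, h2, h3⟩ := hprop x hx
        exact ⟨v, s, by rw [PySem.Dict.get?_insert_of_ne rep _ hne]; exact h1,
          by rw [PySem.Dict.getD_insert_of_ne d _ _ hne]; exact h2, h3⟩
      · have hx : x = r := by simpa using hx
        subst hx
        refine ⟨p.2, [], PySem.Dict.get?_insert_self _ _ _, ?_, ?_⟩
        · rw [PySem.Dict.getD_insert_self,
            PySem.Dict.getD_of_not_contains d _ hdc]
          rfl
        · constructor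
          · intro hc; exact absurd (hcs r hc) hdk
          · intro hne; exact absurd rfl hne
  | some v =>
    -- r was already seen
    have hB : pvBStep period (rep, conf) p =
        (rep, if v == p.2 then conf else PySem.Set.add conf r) := by
      simp [pvBStep, ← hr, hg]
    rw [hB]
    have hrk : r ∈ rep.keys := by
      by_contra hn
      rw [(PySem.Dict.get?_eq_none_iff_not_mem_keys rep r).mpr hn] at hg; simp at hg
    have hdk : r ∈ d.keys := hk ▸ hrk
    have hdc : d.contains r = true := (PySem.Dict.contains_iff_mem_keys d r).mpr hdk
    obtain ⟨v', s, h1, h2, h3⟩ := hprop r hdk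
    have hv : v' = v := by rw [h1] at hg; injection hg
    rw [hv] at h1 h2
    have hkeys : (d.insert r (PySem.Set.add (d.getD r PySem.Set.empty) p.2)).keys = d.keys :=
      PySem.Dict.keys_insert_of_contains d _ hdc
    have hconf' : ∀ x, (x ∈ if v == p.2 then conf else PySem.Set.add conf r) ↔
        (x ∈ conf ∨ (v ≠ p.2 ∧ x = r)) := by
      intro x; split
      · rename_i hvp; simp at hvp; simp [hvp]
      · rename_i hvp; simp at hvp; rw [PySem.Set.mem_add]; tauto
    refine ⟨by rw [hkeys]; exact hk, by rw [hkeys]; exact hnd, ?_, ?_, ?_⟩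
    · split
      · exact hcn
      · exact PySem.Set.nodup_add conf r hcn
    · intro x hx
      rw [hkeys]
      rcases (hconf' x).mp hx with hx | ⟨_, hx⟩
      · exact hcs x hx
      · exact hx ▸ hdk
    · intro x hx
      rw [hkeys] at hx
      by_cases hxr : x = r
      · subst hxr
        by_cases hmem : p.2 ∈ v :: s
        · -- value already present: A's set unchanged
          refine ⟨v, s, h1, ?_, ?_⟩
          · rw [PySem.Dict.getD_insert_self, h2]
            unfold PySem.Set.add
            simp [hmem]
          · rw [hconf' r]
            constructor
            · rintro (hc | ⟨hne, _⟩)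
              · exact h3.mp hc
              · rcases List.mem_cons.mp hmem with hpv | hps
                · exact absurd hpv.symm hne
                · exact List.ne_nil_of_mem hps
            · intro hs; exact Or.inl (h3.mpr hs)
        · -- new value appended: tail becomes nonempty, and p.2 ≠ v
          have hne : v ≠ p.2 := fun e => hmem (e ▸ List.mem_cons_self)
          refine ⟨v, s ++ [p.2], h1, ?_, ?_⟩
          · rw [PySem.Dict.getD_insert_self, h2]
            unfold PySem.Set.add
            simp [hmem]
          · rw [hconf' r]
            simp [hne]
      · obtain ⟨w, t, g1, g2, g3⟩ := hprop x hx
        refine ⟨w, t, g1, by rw [PySem.Dict.getD_insert_of_ne d _ _ hxr]; exact g2, ?_⟩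
        rw [hconf' x]
        constructor
        · rintro (hc | ⟨_, hc⟩)
          · exact g3.mp hc
          · exact absurd hc hxr
        · intro ht; exact Or.inl (g3.mpr ht)

theorem pvInv_fold (period : Int) (l : List (Int × Int)) :
    ∀ (d : PySem.Dict Int (PySem.Set Int)) (rep : PySem.Dict Int Int) (conf : PySem.Set Int),
      pvInv d rep conf →
      pvInv (l.foldl (pvAStep period) d)
        (l.foldl (pvBStep period) (rep, conf)).1 (l.foldl (pvBStep period) (rep, conf)).2 := by
  induction l with
  | nil => intro d rep conf h; exact h
  | cons p t ih =>
    intro d rep conf h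
    have hstep := pvInv_step period d rep conf p h
    simp only [List.foldl_cons]
    exact ih _ _ _ hstep

theorem pvInv_counts (d : PySem.Dict Int (PySem.Set Int)) (rep : PySem.Dict Int Int)
    (conf : PySem.Set Int) (h : pvInv d rep conf) :
    (((d.values.filter (fun vals => vals.length == 1)).length : Int),
      (d.size : Int),
      ((d.values.filter (fun vals => 1 < vals.length)).length : Int)) =
    ((rep.size : Int) - (conf.length : Int), (rep.size : Int), (conf.length : Int)) := by
  obtain ⟨hk, hnd, hcn, hcs, hprop⟩ := h
  have hvals : d.values = d.keys.map (fun k => d.getD k PySem.Set.empty) :=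
    PySem.Dict.values_eq_map_keys d hnd PySem.Set.empty
  have hsz : ∀ {ν : Type} (e : PySem.Dict Int ν), e.size = e.keys.length := by
    intro ν e
    rw [PySem.Dict.size, PySem.Dict.keys, List.length_map]
  have hsize : d.size = rep.size := by
    rw [hsz d, hsz rep, hk]
  -- on keys, length = 1 ↔ not in conf, length > 1 ↔ in conf
  have hc1 : ∀ r ∈ d.keys,
      ((d.getD r PySem.Set.empty).length == 1) = decide (r ∉ conf) := by
    intro r hr
    obtain ⟨v, s, _, h2, h3⟩ := hprop r hr
    rw [h2]
    by_cases hs : s = []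
    · subst hs; simp [h3]
    · have hrc := h3.mpr hs
      simp [List.length_cons, hrc, hs]
  have hc2 : ∀ r ∈ d.keys,
      (decide (1 < (d.getD r PySem.Set.empty).length)) = decide (r ∈ conf) := by
    intro r hr
    obtain ⟨v, s, _, h2, h3⟩ := hprop r hr
    rw [h2]
    by_cases hs : s = []
    · subst hs; simp [h3]
    · have := List.length_pos_iff.mpr hs
      simp [h3, hs]
      omega
  -- the conflict count is the number of keys inside conf
  have hcount2 : d.keys.countP (fun r => decide (r ∈ conf)) = conf.length := by
    have hperm : (d.keys.filter (fun r => decide (r ∈ conf))).Perm conf := by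
      rw [List.perm_ext_iff_of_nodup (List.Nodup.filter _ hnd) hcn]
      intro a
      simp only [List.mem_filter, decide_eq_true_eq]
      exact ⟨fun h => h.2, fun h => ⟨hcs a h, h⟩⟩
    rw [List.countP_eq_length_filter]
    exact hperm.length_eq
  have e2 : (d.values.filter (fun vals => 1 < vals.length)).length
      = conf.length := by
    rw [hvals, List.filter_map, List.length_map, ← List.countP_eq_length_filter]
    have hcg : List.countP ((fun vals => decide (1 < vals.length)) ∘ fun k => d.getD k PySem.Set.empty) d.keys
        = List.countP (fun r => decide (r ∈ conf)) d.keys :=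
      List.countP_congr (fun r hr => by simp only [Function.comp_apply, hc2 r hr])
    rw [hcg]
    exact hcount2
  have e1 : (d.values.filter (fun vals => vals.length == 1)).length
      = d.keys.length - conf.length := by
    rw [hvals, List.filter_map, List.length_map, ← List.countP_eq_length_filter]
    have hcg : List.countP ((fun vals => vals.length == 1) ∘ fun k => d.getD k PySem.Set.empty) d.keys
        = List.countP (fun r => decide (r ∉ conf)) d.keys :=
      List.countP_congr (fun r hr => by simp only [Function.comp_apply, hc1 r hr])
    rw [hcg]
    have hsum := List.length_eq_countP_add_countP (fun r => decide (r ∈ conf)) (l := d.keys)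
    have hnot : d.keys.countP (fun r => decide (r ∉ conf))
        = d.keys.countP (fun a => decide (¬ decide (a ∈ conf) = true)) := by
      apply List.countP_congr; intro r _; simp
    rw [hnot]; omega
  have hle : conf.length ≤ d.keys.length := by
    rw [← hcount2]; exact List.countP_le_length
  refine Prod.ext ?_ (Prod.ext ?_ ?_) <;> simp only
  · rw [e1, ← hsize, hsz d]; omega
  · rw [hsize]
  · rw [e2]

-- ===== VERDICT (by name: the statement is the Claim_ definition above) =====
theorem check_periodic_consistency_spec : Claim_equal_check_periodic_consistency := by
  intro key_at_rank period _ _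
  unfold Spec_check_periodic_consistency check_periodic_consistency check_periodic_consistency_alt
  have h0 : pvInv PySem.Dict.empty PySem.Dict.empty PySem.Set.empty := by
    refine ⟨rfl, ?_, ?_, ?_, ?_⟩ <;> simp [PySem.Dict.keys, PySem.Dict.empty, PySem.Set.empty]
  have hinv := pvInv_fold period key_at_rank PySem.Dict.empty PySem.Dict.empty PySem.Set.empty h0
  have hcounts := pvInv_counts _ _ _ hinv
  simpa using hcounts
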